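-- pv_equiv track=rewrite | github.com/MBradbury/cs407-group-project | Results/analyse.py | latestValues
-- ===== SOURCE A (Python) =====
-- def latestValues(values, keyName, maxTime=None):
-- 	result = {}
--
-- 	for value in values:
--
-- 		nodeId = value[keyName]
--
-- 		# Not seen this node before
-- 		if nodeId not in result:
-- 			result[nodeId] = value
--
-- 		# Seen this node before
-- 		else:
-- 			stored = result[nodeId]
--
-- 			# Check if this is a latter time
-- 			if value[u"clock"] > stored[u"clock"]:
-- 				if maxTime is None or value[u"clock"] <= maxTime:
-- 					# Newer so update
-- 					result[nodeId] = value
--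
-- 	return result
-- ===== SOURCE B (Python) =====
-- def latestValues(values, keyName, maxTime=None):
-- 	# Group values per node id (insertion order preserved), then reduce each
-- 	# group: seed with its first element, replace when a later value has a
-- 	# strictly greater clock that does not exceed maxTime.
-- 	groups = {}
-- 	for value in values:
-- 		groups.setdefault(value[keyName], []).append(value)
--
-- 	def best(group):
-- 		chosen = group[0]
-- 		for value in group[1:]:
-- 			if value[u"clock"] > chosen[u"clock"] and (maxTime is None or value[u"clock"] <= maxTime):
-- 				chosen = value
-- 		return chosen
--
-- 	return {nodeId: best(group) for nodeId, group in groups.items()}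
-- ===== Notes on version B (the rewrite author's own statement) =====
-- stated objective: alternative
-- what changed: Single fold updating a best-so-far dict is replaced by a group-by pass (nodeId -> ordered list of its values) followed by a per-group reduction seeded with the group's first element, with the maxTime filter applied only to later updates.
import Mathlib
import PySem

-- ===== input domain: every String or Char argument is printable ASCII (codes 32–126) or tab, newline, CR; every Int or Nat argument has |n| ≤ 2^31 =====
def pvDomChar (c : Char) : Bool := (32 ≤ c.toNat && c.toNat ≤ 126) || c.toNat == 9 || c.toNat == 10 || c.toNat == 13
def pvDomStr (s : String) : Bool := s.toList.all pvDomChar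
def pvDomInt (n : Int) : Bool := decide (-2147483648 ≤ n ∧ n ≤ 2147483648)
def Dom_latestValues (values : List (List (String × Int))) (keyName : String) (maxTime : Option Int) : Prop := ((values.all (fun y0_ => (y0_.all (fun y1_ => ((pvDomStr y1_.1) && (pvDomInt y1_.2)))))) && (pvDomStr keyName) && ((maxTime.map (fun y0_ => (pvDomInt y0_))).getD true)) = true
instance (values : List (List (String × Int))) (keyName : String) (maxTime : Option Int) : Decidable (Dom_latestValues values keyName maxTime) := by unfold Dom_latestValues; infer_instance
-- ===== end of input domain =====

-- B replaces A's single best-so-far fold by a group-by pass plus a per-group reduction (alternative decomposition, same cost).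


-- ===== PORT A =====
-- value[k] on a Python dict passed in as an association list: first match (exact; none = KeyError)
def pvLook : List (String × Int) → String → Option Int
  | [], _ => none
  | (k, x) :: t, s => if k = s then some x else pvLook t s

-- 'maxTime is None or vc <= maxTime'
def pvOkTime (maxTime : Option Int) (vc : Int) : Bool :=
  match maxTime with
  | none => true
  | some m => decide (vc ≤ m)

-- one iteration of A's loop
def pvStepA (keyName : String) (maxTime : Option Int)
    (result : PySem.Dict Int (List (String × Int))) (value : List (String × Int)) :
    PySem.Dict Int (List (String × Int)) :=
  match pvLook value keyName with
  | none => result  -- value[keyName] raises KeyError: outside Pre_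
  | some nodeId =>
    if result.contains nodeId = false then
      result.insert nodeId value
    else
      match result.get? nodeId with
      | none => result  -- unreachable: contains holds
      | some stored =>
        match pvLook value "clock", pvLook stored "clock" with
        | some vc, some sc =>
          if vc > sc then
            if pvOkTime maxTime vc then result.insert nodeId value else result
          else result
        | _, _ => result  -- value[u"clock"]/stored[u"clock"] raises KeyError: outside Pre_

def latestValues (values : List (List (String × Int))) (keyName : String) (maxTime : Option Int) : List (Int × List (String × Int)) :=
  (values.foldl (pvStepA keyName maxTime) PySem.Dict.empty).items

-- ===== PORT B =====
-- groups.setdefault(value[keyName], []).append(value)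
def pvGroupStep (keyName : String)
    (groups : PySem.Dict Int (List (List (String × Int)))) (value : List (String × Int)) :
    PySem.Dict Int (List (List (String × Int))) :=
  match pvLook value keyName with
  | none => groups  -- KeyError: outside Pre_
  | some nodeId => groups.modify nodeId [] (fun l => l ++ [value])

-- one iteration of best's loop
def pvBetter (maxTime : Option Int) (chosen value : List (String × Int)) : List (String × Int) :=
  match pvLook value "clock", pvLook chosen "clock" with
  | some vc, some cc => if (decide (vc > cc) && pvOkTime maxTime vc) = true then value else chosen
  | _, _ => chosen  -- KeyError: outside Pre_

-- best(group): seed with group[0], fold the rest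
def pvBest (maxTime : Option Int) : List (List (String × Int)) → List (String × Int)
  | [] => []  -- groups are never empty
  | h :: t => t.foldl (pvBetter maxTime) h

def latestValues_alt (values : List (List (String × Int))) (keyName : String) (maxTime : Option Int) : List (Int × List (String × Int)) :=
  ((values.foldl (pvGroupStep keyName) PySem.Dict.empty).items).map
    (fun p => (p.1, pvBest maxTime p.2))

-- ===== PRECONDITION & SPEC =====
-- Exactly the inputs where A returns: every value has keyName, and every value whose
-- node id occurs at least twice has a "clock" key (A only reads clocks on repeats).
def Pre_latestValues (values : List (List (String × Int))) (keyName : String) (maxTime : Option Int) : Prop :=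
  ∀ v ∈ values, keyName ∈ v.map Prod.fst ∧
    (2 ≤ values.countP (fun w => List.lookup keyName w == List.lookup keyName v) →
      "clock" ∈ v.map Prod.fst)
instance (values : List (List (String × Int))) (keyName : String) (maxTime : Option Int) : Decidable (Pre_latestValues values keyName maxTime) := by unfold Pre_latestValues; infer_instance

def pvWitness_latestValues : (List (List (String × Int))) × String × Option Int :=
  ([[("id", 1), ("clock", 5)], [("id", 1), ("clock", 7)], [("id", 2), ("clock", 3)]], "id", some 10)

def Spec_latestValues (values : List (List (String × Int))) (keyName : String) (maxTime : Option Int) (out : List (Int × List (String × Int))) : Prop := out = latestValues_alt values keyName maxTime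
instance (values : List (List (String × Int))) (keyName : String) (maxTime : Option Int) (out : List (Int × List (String × Int))) : Decidable (Spec_latestValues values keyName maxTime out) := by unfold Spec_latestValues; infer_instance

-- ===== CLAIM (what is proved, stated in full; the proofs are below) =====
def Claim_equal_latestValues : Prop := ∀ (values : List (List (String × Int))) (keyName : String) (maxTime : Option Int), Dom_latestValues values keyName maxTime → Pre_latestValues values keyName maxTime → Spec_latestValues values keyName maxTime (latestValues values keyName maxTime)

-- ===== LEMMAS AND PROOFS =====

-- A's accumulator, reconstructed from B's groups accumulator
def pvMapRed (maxTime : Option Int) (g : PySem.Dict Int (List (List (String × Int)))) :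
    PySem.Dict Int (List (String × Int)) :=
  PySem.Dict.mk (g.items.map (fun p => (p.1, pvBest maxTime p.2)))

theorem pvWitness_ok : Dom_latestValues (pvWitness_latestValues.1) (pvWitness_latestValues.2.1) (pvWitness_latestValues.2.2) ∧ Pre_latestValues (pvWitness_latestValues.1) (pvWitness_latestValues.2.1) (pvWitness_latestValues.2.2) := by
  constructor <;> decide

theorem contains_mapRed (mt : Option Int) (g : PySem.Dict Int (List (List (String × Int)))) (k : Int) :
    (pvMapRed mt g).contains k = g.contains k := by
  simp [pvMapRed, PySem.Dict.contains, List.any_map, Function.comp_def]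

theorem get?_mapRed (mt : Option Int) (g : PySem.Dict Int (List (List (String × Int)))) (k : Int) :
    (pvMapRed mt g).get? k = (g.get? k).map (pvBest mt) := by
  simp only [pvMapRed, PySem.Dict.get?, List.find?_map, Function.comp_def, Option.map_map]

theorem keys_mapRed (mt : Option Int) (g : PySem.Dict Int (List (List (String × Int)))) :
    (pvMapRed mt g).keys = g.keys := by
  simp [pvMapRed, PySem.Dict.keys, Function.comp_def]

theorem mapRed_insert (mt : Option Int) (g : PySem.Dict Int (List (List (String × Int))))
    (k : Int) (gl : List (List (String × Int))) :
    pvMapRed mt (g.insert k gl) = (pvMapRed mt g).insert k (pvBest mt gl) := by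
  apply PySem.Dict.ext
  by_cases h : g.contains k = true
  · rw [show (pvMapRed mt (g.insert k gl)).items
        = (g.insert k gl).items.map (fun p => (p.1, pvBest mt p.2)) from rfl,
      PySem.Dict.items_insert_of_contains g gl h,
      PySem.Dict.items_insert_of_contains (pvMapRed mt g) (pvBest mt gl)
        (by rw [contains_mapRed]; exact h)]
    simp only [pvMapRed, List.map_map]
    apply List.map_congr_left
    intro p _
    by_cases hp : (p.1 == k) = true
    · have : p.1 = k := by simpa using hp
      simp [this]
    · have : p.1 ≠ k := by simpa using hp
      simp [this]
  · have h' : g.contains k = false := by simpa using h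
    rw [show (pvMapRed mt (g.insert k gl)).items
        = (g.insert k gl).items.map (fun p => (p.1, pvBest mt p.2)) from rfl,
      PySem.Dict.items_insert_of_not_contains g gl h',
      PySem.Dict.items_insert_of_not_contains (pvMapRed mt g) (pvBest mt gl)
        (by rw [contains_mapRed]; exact h')]
    simp [pvMapRed]

theorem pvBest_append (mt : Option Int) (gl : List (List (String × Int))) (v : List (String × Int))
    (h : gl ≠ []) : pvBest mt (gl ++ [v]) = pvBetter mt (pvBest mt gl) v := by
  cases gl with
  | nil => exact absurd rfl h
  | cons hd t => simp [pvBest, List.foldl_append]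

theorem insert_same_value {ν : Type} (d : PySem.Dict Int ν) (k : Int) (w : ν)
    (hnd : d.keys.Nodup) (h : d.get? k = some w) : d.insert k w = d := by
  have hc : d.contains k = true := by
    rw [PySem.Dict.contains_eq_isSome_get?, h]; rfl
  apply PySem.Dict.ext
  rw [PySem.Dict.items_insert_of_contains d w hc]
  have hmem : (k, w) ∈ d.items := PySem.Dict.mem_items_of_get?_eq_some d h
  have hinj := List.inj_on_of_nodup_map (f := fun p : Int × ν => p.1)
    (l := d.items) (by simpa [PySem.Dict.keys] using hnd)
  have : ∀ p ∈ d.items, (if (p.1 == k) = true then (k, w) else p) = p := by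
    intro p hp
    by_cases hpk : (p.1 == k) = true
    · have h1 : p.1 = k := by simpa using hpk
      have : p = (k, w) := hinj hp hmem (by simp [h1])
      simp [this]
    · simp [hpk]
  rw [List.map_congr_left this]
  simp

theorem step_comm (kn : String) (mt : Option Int)
    (g : PySem.Dict Int (List (List (String × Int)))) (v : List (String × Int))
    (hnd : g.keys.Nodup) (hne : ∀ p ∈ g.items, p.2 ≠ []) :
    pvStepA kn mt (pvMapRed mt g) v = pvMapRed mt (pvGroupStep kn g v) := by
  unfold pvStepA pvGroupStep
  cases hlk : pvLook v kn with
  | none => rfl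
  | some nid =>
    simp only [PySem.Dict.modify, contains_mapRed]
    have hndm : (pvMapRed mt g).keys.Nodup := by rw [keys_mapRed]; exact hnd
    by_cases hc : g.contains nid = true
    · -- node seen before
      obtain ⟨gl, hgl⟩ : ∃ gl, g.get? nid = some gl := by
        rw [PySem.Dict.contains_eq_isSome_get?] at hc
        exact Option.isSome_iff_exists.mp hc
      have hglne : gl ≠ [] := hne _ (PySem.Dict.mem_items_of_get?_eq_some g hgl)
      have hgd : g.getD nid [] = gl := PySem.Dict.getD_of_get?_eq_some g [] hgl
      have hget : (pvMapRed mt g).get? nid = some (pvBest mt gl) := by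
        rw [get?_mapRed, hgl]; rfl
      rw [mapRed_insert, hgd, pvBest_append mt gl v hglne]
      rw [if_neg (by simp [hc]), hget]
      unfold pvBetter
      cases hvc : pvLook v "clock" with
      | none => simp [insert_same_value _ _ _ hndm hget]
      | some vc =>
        cases hsc : pvLook (pvBest mt gl) "clock" with
        | none => simp [hsc, insert_same_value _ _ _ hndm hget]
        | some sc =>
          by_cases hgt : vc > sc
          · by_cases hok : pvOkTime mt vc = true
            · simp [hsc, hgt, hok]
            · have hok2 : pvOkTime mt vc = false := by simpa using hok
              simp [hsc, hgt, hok2, insert_same_value _ _ _ hndm hget]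
          · simp [hsc, hgt, insert_same_value _ _ _ hndm hget]
    · -- first time this node is seen
      have hc' : g.contains nid = false := by simpa using hc
      have hgd : g.getD nid [] = [] := PySem.Dict.getD_of_not_contains g [] hc'
      rw [mapRed_insert, hgd, if_pos (by simp [hc'])]
      rfl

theorem stepG_preserves (kn : String)
    (g : PySem.Dict Int (List (List (String × Int)))) (v : List (String × Int))
    (hnd : g.keys.Nodup) (hne : ∀ p ∈ g.items, p.2 ≠ []) :
    (pvGroupStep kn g v).keys.Nodup ∧ ∀ p ∈ (pvGroupStep kn g v).items, p.2 ≠ [] := by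
  unfold pvGroupStep
  cases pvLook v kn with
  | none => exact ⟨hnd, hne⟩
  | some nid =>
    simp only [PySem.Dict.modify]
    refine ⟨PySem.Dict.nodup_keys_insert _ _ _ hnd, ?_⟩
    intro p hp
    rcases (PySem.Dict.mem_items_insert _ _ _ _).mp hp with h | h
    · subst h; simp
    · exact hne _ h.1

theorem loop_inv (kn : String) (mt : Option Int) :
    ∀ (vs : List (List (String × Int))) (g : PySem.Dict Int (List (List (String × Int)))),
      g.keys.Nodup → (∀ p ∈ g.items, p.2 ≠ []) →
      vs.foldl (pvStepA kn mt) (pvMapRed mt g) = pvMapRed mt (vs.foldl (pvGroupStep kn) g) := by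
  intro vs
  induction vs with
  | nil => intro g _ _; rfl
  | cons v t ih =>
    intro g hnd hne
    obtain ⟨hnd2, hne2⟩ := stepG_preserves kn g v hnd hne
    simp only [List.foldl_cons, step_comm kn mt g v hnd hne]
    exact ih _ hnd2 hne2

-- ===== VERDICT (by name: the statement is the Claim_ definition above) =====
theorem latestValues_spec : Claim_equal_latestValues := by
  intro values keyName maxTime _ _
  unfold Spec_latestValues latestValues latestValues_alt
  have h := loop_inv keyName maxTime values PySem.Dict.empty
    (by simp [PySem.Dict.empty, PySem.Dict.keys]) (by simp [PySem.Dict.empty])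
  have he : pvMapRed maxTime PySem.Dict.empty = PySem.Dict.empty := rfl
  rw [he] at h
  rw [h]
  rfl
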